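-- pv_equiv track=rewrite | github.com/Muzuwi/wmt-pyloader | src/launcher.py | get_patch_prefix
-- ===== SOURCE A (Python) =====
-- ROM_PREFIXES = {
--     "ROMv1": [0x6572, 0x6582, 0x6592, 0x6595],
--     "ROMv2": [0x8127],
--     "ROMv2_lm": [
--         0x321,
--         0x326,
--         0x335,
--         0x337,
--         0x6735,
--         0x6739,
--         0x6752,
--         0x6755,
--         0x6757,
--         0x6763,
--     ],
--     "ROMv3": [0x279],
--     "ROMv4": [0x507, 0x6759],
--     "ROMv4_be": [0x6771, 0x6775],
--     "soc1_0": [0x6761, 0x6765, 0x6768, 0x6785, 0x3967, 0x8163],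
--     "soc2_0": [0x6779, 0x6853, 0x6873],
-- }
--
-- CHIP_RANGES_ROMv1 = range(0x6570, 0x6593)
--
-- def get_patch_prefix(chip_id: int) -> str:
--     """Determines the patch prefix for srh_patch commands."""
--     for prefix, ids in ROM_PREFIXES.items():
--         if chip_id in ids:
--             return prefix
--
--     if chip_id in CHIP_RANGES_ROMv1:
--         if chip_id in ROM_PREFIXES["ROMv1"]:
--             return "ROMv1"
--         if chip_id in ROM_PREFIXES["ROMv2_lm"]:
--             return "ROMv2_lm"
--         if chip_id == 0x8127:
--             return "ROMv2"
--         if chip_id in [0x3967, 0x8163]: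
--             return "soc1_0"
--         if chip_id in [0x6853, 0x6873]:
--             return "soc2_0"
--
--     known_prefix_ids = set(range(0x6736, 0x6797))
--     if chip_id in known_prefix_ids:
--         return f"mt{chip_id:x}"
--
--     raise Exception(f"Don't know any patch prefix for chip_id {chip_id:x}")
-- ===== SOURCE B (Python) =====
-- ROM_PREFIXES = {
--     "ROMv1": [0x6572, 0x6582, 0x6592, 0x6595],
--     "ROMv2": [0x8127],
--     "ROMv2_lm": [
--         0x321,
--         0x326,
--         0x335,
--         0x337,
--         0x6735,
--         0x6739,
--         0x6752,
--         0x6755,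
--         0x6757,
--         0x6763,
--     ],
--     "ROMv3": [0x279],
--     "ROMv4": [0x507, 0x6759],
--     "ROMv4_be": [0x6771, 0x6775],
--     "soc1_0": [0x6761, 0x6765, 0x6768, 0x6785, 0x3967, 0x8163],
--     "soc2_0": [0x6779, 0x6853, 0x6873],
-- }
--
-- # Flat table of (chip_id, prefix) pairs, sorted once by chip_id (the ids are pairwise
-- # distinct, so binary search finds the unique matching prefix).
-- _TABLE = sorted(
--     ((cid, prefix) for prefix, ids in ROM_PREFIXES.items() for cid in ids),
--     key=lambda entry: entry[0],
-- )
--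
--
-- def get_patch_prefix(chip_id: int) -> str:
--     """Determines the patch prefix for srh_patch commands."""
--     lo, hi = 0, len(_TABLE)
--     while lo < hi:
--         mid = (lo + hi) // 2
--         cid, prefix = _TABLE[mid]
--         if cid == chip_id:
--             return prefix
--         if cid < chip_id:
--             lo = mid + 1
--         else:
--             hi = mid
--     if 0x6736 <= chip_id < 0x6797:
--         return f"mt{chip_id:x}"
--     raise Exception(f"Don't know any patch prefix for chip_id {chip_id:x}")
-- ===== Notes on version B (the rewrite author's own statement) =====
-- stated objective: alternative
-- what changed: Replaced the per-call linear scan over all eight ROM_PREFIXES lists and the dead CHIP_RANGES_ROMv1 block with one flat (chip_id, prefix) table sorted once at import and a hand-written binary-search loop per call, plus one range comparison; correct because the table's chip ids are pairwise distinct.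
import Mathlib
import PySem

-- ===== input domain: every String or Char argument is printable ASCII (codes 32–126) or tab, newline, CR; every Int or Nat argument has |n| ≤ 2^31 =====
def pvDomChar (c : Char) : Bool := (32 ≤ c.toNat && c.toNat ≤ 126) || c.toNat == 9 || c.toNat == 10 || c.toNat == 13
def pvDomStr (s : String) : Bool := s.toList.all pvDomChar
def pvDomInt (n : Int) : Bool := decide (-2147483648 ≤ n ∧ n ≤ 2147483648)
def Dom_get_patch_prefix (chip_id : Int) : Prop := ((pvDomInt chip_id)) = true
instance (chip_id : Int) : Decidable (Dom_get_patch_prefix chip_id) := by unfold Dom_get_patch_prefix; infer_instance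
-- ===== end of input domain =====

-- B replaces A's per-call scan over the eight ROM_PREFIXES lists (and the dead CHIP_RANGES_ROMv1
-- block) with one sorted (chip_id, prefix) table built once and a binary search, plus one range
-- comparison: an alternative algorithm of similar size.


-- ===== PORT A =====
def ROM_PREFIXES : List (String × List Int) :=
  [("ROMv1", [0x6572, 0x6582, 0x6592, 0x6595]),
   ("ROMv2", [0x8127]),
   ("ROMv2_lm", [0x321, 0x326, 0x335, 0x337, 0x6735, 0x6739, 0x6752, 0x6755, 0x6757, 0x6763]),
   ("ROMv3", [0x279]),
   ("ROMv4", [0x507, 0x6759]),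
   ("ROMv4_be", [0x6771, 0x6775]),
   ("soc1_0", [0x6761, 0x6765, 0x6768, 0x6785, 0x3967, 0x8163]),
   ("soc2_0", [0x6779, 0x6853, 0x6873])]

-- f"mt{chip_id:x}": lowercase hex of chip_id; exact for chip_id ≥ 0, and every call site is
-- guarded by 0x6736 ≤ chip_id, so .toNat loses nothing there.
def pyHexNonneg (n : Int) : String := String.ofList (Nat.toDigits 16 n.toNat)

-- the tail of A after the first loop and the ROMv1-range block both fell through:
-- 'chip_id in set(range(0x6736, 0x6797))' check, else the raise (Pre_ excludes it; "" stands for the raise)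
def get_patch_prefix_tail (chip_id : Int) : String :=
  if (PySem.List.pyRange 0x6736 0x6797 1).contains chip_id then
    "mt" ++ pyHexNonneg chip_id
  else
    ""  -- raise Exception(...): unreachable under Pre_get_patch_prefix

def get_patch_prefix (chip_id : Int) : String :=
  -- for prefix, ids in ROM_PREFIXES.items(): if chip_id in ids: return prefix
  match ROM_PREFIXES.find? (fun pr => pr.2.contains chip_id) with
  | some pr => pr.1
  | none =>
    -- if chip_id in CHIP_RANGES_ROMv1: (the inner returns, falling through to the tail otherwise)
    if (PySem.List.pyRange 0x6570 0x6593 1).contains chip_id then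
      if ([0x6572, 0x6582, 0x6592, 0x6595] : List Int).contains chip_id then "ROMv1"
      else if ([0x321, 0x326, 0x335, 0x337, 0x6735, 0x6739, 0x6752, 0x6755, 0x6757, 0x6763] : List Int).contains chip_id then "ROMv2_lm"
      else if chip_id == 0x8127 then "ROMv2"
      else if ([0x3967, 0x8163] : List Int).contains chip_id then "soc1_0"
      else if ([0x6853, 0x6873] : List Int).contains chip_id then "soc2_0"
      else get_patch_prefix_tail chip_id
    else get_patch_prefix_tail chip_id

-- ===== PORT B =====
-- _TABLE = sorted(((cid, prefix) for prefix, ids in ROM_PREFIXES.items() for cid in ids), key=fst)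
def TABLE : List (Int × String) :=
  PySem.List.sorted (ROM_PREFIXES.flatMap (fun pr => pr.2.map (fun cid => (cid, pr.1))))
    (fun entry => entry.1)

-- the 'while lo < hi' binary-search loop of Source B; fuel = hi - lo bounds the iterations
-- (hi - lo strictly decreases each round), so fuel = len(_TABLE) never runs out
def bsearchLoop (chip_id : Int) (tbl : List (Int × String)) : Nat → Nat → Nat → Option String
  | 0, _, _ => none
  | fuel + 1, lo, hi =>
    if lo < hi then
      let mid := (lo + hi) / 2
      let e := tbl.getD mid (0, "")   -- cid, prefix = _TABLE[mid]; mid < hi ≤ len, so in range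
      if e.1 == chip_id then some e.2
      else if e.1 < chip_id then bsearchLoop chip_id tbl fuel (mid + 1) hi
      else bsearchLoop chip_id tbl fuel lo mid
    else none

def get_patch_prefix_alt (chip_id : Int) : String :=
  match bsearchLoop chip_id TABLE TABLE.length 0 TABLE.length with
  | some pfx => pfx
  | none =>
    if 0x6736 ≤ chip_id ∧ chip_id < 0x6797 then "mt" ++ pyHexNonneg chip_id
    else ""  -- raise Exception(...): unreachable under Pre_get_patch_prefix

-- ===== PRECONDITION & SPEC =====
-- Pre_ excludes exactly the chip_ids on which A raises its Exception: everything outside the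
-- ROM_PREFIXES id lists and outside range(0x6736, 0x6797).
def Pre_get_patch_prefix (chip_id : Int) : Prop :=
  chip_id ∈ ROM_PREFIXES.flatMap Prod.snd ∨ (0x6736 ≤ chip_id ∧ chip_id < 0x6797)
instance (chip_id : Int) : Decidable (Pre_get_patch_prefix chip_id) := by unfold Pre_get_patch_prefix; infer_instance

def pvWitness_get_patch_prefix : Int := 0x6572

def Spec_get_patch_prefix (chip_id : Int) (out : String) : Prop := out = get_patch_prefix_alt chip_id
instance (chip_id : Int) (out : String) : Decidable (Spec_get_patch_prefix chip_id out) := by unfold Spec_get_patch_prefix; infer_instance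

-- ===== CLAIM (what is proved, stated in full; the proofs are below) =====
def Claim_equal_get_patch_prefix : Prop := ∀ (chip_id : Int), Dom_get_patch_prefix chip_id → Pre_get_patch_prefix chip_id → Spec_get_patch_prefix chip_id (get_patch_prefix chip_id)

-- ===== LEMMAS AND PROOFS =====

-- every chip_id admitted by Pre_ lies in this explicit finite list
def preList : List Int := ROM_PREFIXES.flatMap Prod.snd ++ PySem.List.pyRange 0x6736 0x6797 1

lemma mem_preList_of_pre (chip_id : Int) (h : Pre_get_patch_prefix chip_id) :
    chip_id ∈ preList := by
  unfold Pre_get_patch_prefix at h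
  unfold preList
  rcases h with h | h
  · exact List.mem_append_left _ h
  · exact List.mem_append_right _ ((PySem.List.mem_pyRange_one).2 ⟨h.1, h.2⟩)

lemma preList_all_eq :
    preList.all (fun c => get_patch_prefix c == get_patch_prefix_alt c) = true := by decide

-- ===== VERDICT (by name: the statement is the Claim_ definition above) =====
theorem get_patch_prefix_spec : Claim_equal_get_patch_prefix := by
  intro chip_id _ hpre
  unfold Spec_get_patch_prefix
  have hmem := mem_preList_of_pre chip_id hpre
  have := List.all_eq_true.mp preList_all_eq chip_id hmem
  exact eq_of_beq this
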